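-- pv_equiv track=rewrite | github.com/RBVI/ChimeraX | src/bundles/alphafold/src/kmer_search/kmer_search.py | afdb_v3_uniprot_id_and_name
-- ===== SOURCE A (Python) =====
-- def afdb_v3_uniprot_id_and_name(title):
--     # AlphaFold Database version 3 title line format
--     # >AFDB:AF-A0A2L2JPH6-F1 Uncharacterized protein UA=A0A2L2JPH6 UI=A0A2L2JPH6_9NOCA OS=Nocardia cyriacigeorgica OX=135487 GN=C5B73_08745
--     uniprot_id = uniprot_name = 'unknown'
--     fields = title.split()
--     for f in fields:
--         if f.startswith('UA='):
--             uniprot_id = f[3:]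
--         if f.startswith('UI='):
--             uniprot_name = f[3:]
--     return uniprot_id, uniprot_name
-- ===== SOURCE B (Python) =====
-- def afdb_v3_uniprot_id_and_name(title):
--     # Build a key->value index of the 'KEY=value' fields in one pass (last
--     # occurrence wins, as dict assignment overwrites), then look up UA and UI.
--     d = {}
--     for f in title.split():
--         i = f.find('=')
--         if i != -1:
--             d[f[:i]] = f[i + 1:]
--     return d.get('UA', 'unknown'), d.get('UI', 'unknown')
-- ===== Notes on version B (the rewrite author's own statement) =====
-- stated objective: idiomatic
-- what changed: Replaces the two per-field prefix checks and pair accumulator with a single generic key=value index built in one pass (first '=' splits the field, dict overwrite keeps last-wins), followed by two defaulted dict lookups.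
import Mathlib
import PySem

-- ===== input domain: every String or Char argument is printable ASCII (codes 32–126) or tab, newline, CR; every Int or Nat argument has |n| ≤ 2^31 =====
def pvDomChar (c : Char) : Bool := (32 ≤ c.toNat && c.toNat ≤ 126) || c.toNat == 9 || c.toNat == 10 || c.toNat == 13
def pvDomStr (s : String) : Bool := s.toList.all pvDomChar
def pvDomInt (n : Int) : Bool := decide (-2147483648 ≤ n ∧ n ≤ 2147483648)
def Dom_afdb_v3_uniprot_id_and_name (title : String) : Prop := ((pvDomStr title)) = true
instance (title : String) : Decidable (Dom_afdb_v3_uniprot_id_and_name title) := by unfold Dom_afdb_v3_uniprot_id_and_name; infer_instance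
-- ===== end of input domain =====

-- B replaces A's two per-field prefix checks with a generic key=value dict built in
-- one pass, then two lookups (objective: idiomatic; same cost, no speed claim).

-- ===== PORT A =====
-- Port of A: scan the whitespace fields, updating the (uniprot_id, uniprot_name)
-- pair on the two prefix tests 'UA=' / 'UI=' (last occurrence wins).
def afdb_v3_uniprot_id_and_name (title : String) : String × String :=
  (PySem.Str.split₀ title).foldl (fun st f =>
    let st1 := if PySem.Str.startswith f "UA=" then (PySem.Str.slice f (some 3) none, st.2) else st
    if PySem.Str.startswith f "UI=" then (st1.1, PySem.Str.slice f (some 3) none) else st1)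
    ("unknown", "unknown")

-- ===== PORT B =====
-- Port of B: build a key->value dict from every 'KEY=value' field (split at the
-- first '='; dict overwrite keeps last-wins), then look up 'UA' and 'UI'.
def pvBStep (d : PySem.Dict String String) (f : String) : PySem.Dict String String :=
  let i := PySem.Str.find f "="
  if i != -1 then
    d.insert (PySem.Str.slice f none (some i)) (PySem.Str.slice f (some (i + 1)) none)
  else d

def afdb_v3_uniprot_id_and_name_alt (title : String) : String × String :=
  let d := (PySem.Str.split₀ title).foldl pvBStep PySem.Dict.empty
  (d.getD "UA" "unknown", d.getD "UI" "unknown")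

-- ===== PRECONDITION & SPEC =====
def Spec_afdb_v3_uniprot_id_and_name (title : String) (out : String × String) : Prop := out = afdb_v3_uniprot_id_and_name_alt title
instance (title : String) (out : String × String) : Decidable (Spec_afdb_v3_uniprot_id_and_name title out) := by unfold Spec_afdb_v3_uniprot_id_and_name; infer_instance

-- ===== CLAIM (what is proved, stated in full; the proofs are below) =====
def Claim_equal_afdb_v3_uniprot_id_and_name : Prop := ∀ (title : String), Dom_afdb_v3_uniprot_id_and_name title → Spec_afdb_v3_uniprot_id_and_name title (afdb_v3_uniprot_id_and_name title)

-- ===== LEMMAS AND PROOFS =====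

theorem pv_no_eq (cs : List Char) (c1 c2 : Char) (h : ¬ ['='] <:+: cs) :
    PySem.Chars.startswith cs [c1, c2, '='] = false := by
  rw [Bool.eq_false_iff]
  intro hs
  rcases (PySem.Chars.startswith_iff cs [c1, c2, '=']).mp hs with ⟨t, ht⟩
  exact h ((List.singleton_infix_iff '=' cs).mpr (by rw [← ht]; simp))

theorem pv_prefix_iff (cs : List Char) (c1 c2 : Char) (n : Nat)
    (hc1 : c1 ≠ '=') (hc2 : c2 ≠ '=')
    (hpre : ['='] <+: cs.drop n) (hmin : ∀ j, j < n → ¬ ['='] <+: cs.drop j) :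
    (PySem.Chars.startswith cs [c1, c2, '='] = true ↔ cs.take n = [c1, c2]) ∧
    (cs.take n = [c1, c2] → n = 2) := by
  rcases hpre with ⟨r, hr⟩
  have hlen : n < cs.length := by
    have hne : cs.drop n ≠ [] := by rw [← hr]; simp
    by_contra hle
    exact hne (List.drop_eq_nil_of_le (by omega))
  have hsplit : cs = cs.take n ++ '=' :: r := by
    conv_lhs => rw [← List.take_append_drop n cs]
    rw [← hr]; rfl
  have htaken : (cs.take n).length = n := by
    simp [Nat.min_eq_left (le_of_lt hlen)]
  have hto2 : cs.take n = [c1, c2] → n = 2 := by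
    intro htake
    have := congrArg List.length htake
    rw [htaken] at this; simpa using this
  refine ⟨⟨?_, ?_⟩, hto2⟩
  · intro hs
    rcases (PySem.Chars.startswith_iff cs [c1, c2, '=']).mp hs with ⟨t, ht⟩
    have hn2 : n = 2 := by
      rcases Nat.lt_trichotomy n 2 with h | h | h
      · exfalso
        interval_cases n
        · rw [List.take_zero, List.nil_append] at hsplit
          rw [← ht] at hsplit
          injection hsplit.symm with h1 _
          exact hc1 h1.symm
        · rcases List.length_eq_one_iff.mp htaken with ⟨a, ha⟩
          rw [ha] at hsplit
          rw [← ht] at hsplit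
          simp at hsplit
          exact hc2 hsplit.2.1
      · exact h
      · exact absurd (show ['='] <+: cs.drop 2 by rw [← ht]; exact ⟨t, by simp⟩) (hmin 2 h)
    subst hn2
    rw [← ht]; simp
  · intro htake
    have hn2 := hto2 htake
    subst hn2
    apply (PySem.Chars.startswith_iff cs [c1, c2, '=']).mpr
    exact ⟨r, by rw [hsplit, htake]; rfl⟩

-- A's loop body, named for the proofs.
def pvAStep (st : String × String) (f : String) : String × String :=
  let st1 := if PySem.Str.startswith f "UA=" then (PySem.Str.slice f (some 3) none, st.2) else st
  if PySem.Str.startswith f "UI=" then (st1.1, PySem.Str.slice f (some 3) none) else st1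

theorem pv_step_eq (d : PySem.Dict String String) (f : String) :
    pvAStep (d.getD "UA" "unknown", d.getD "UI" "unknown") f
      = ((pvBStep d f).getD "UA" "unknown", (pvBStep d f).getD "UI" "unknown") := by
  simp only [pvAStep, pvBStep, PySem.Str.startswith_eq, PySem.Str.find_eq,
    show ("UA=" : String).toList = ['U','A','='] from rfl,
    show ("UI=" : String).toList = ['U','I','='] from rfl,
    show ("=" : String).toList = ['='] from rfl]
  by_cases h : PySem.Chars.find f.toList ['='] = -1
  · have hinf : ¬ ['='] <:+: f.toList := (PySem.Chars.find_eq_neg_one_iff f.toList ['=']).mp h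
    simp [pv_no_eq f.toList 'U' 'A' hinf, pv_no_eq f.toList 'U' 'I' hinf, h]
  · have h0 : (0:Int) ≤ PySem.Chars.find f.toList ['='] :=
      (PySem.Chars.find_nonneg_iff f.toList ['=']).mpr
        ((PySem.Chars.find_ne_neg_one_iff f.toList ['=']).mp h)
    obtain ⟨-, hpre, hmin⟩ :=
      PySem.Chars.findFrom_natCast_spec f.toList ['='] 0 (by omega)
        (by rw [Nat.cast_zero, PySem.Chars.findFrom_zero]; exact h)
    rw [Nat.cast_zero, PySem.Chars.findFrom_zero] at hpre hmin
    have hmin' : ∀ j, j < (PySem.Chars.find f.toList ['=']).toNat → ¬ ['='] <+: f.toList.drop j :=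
      fun j hj => hmin j (Nat.zero_le j) hj
    obtain ⟨hiffUA, hto2UA⟩ := pv_prefix_iff f.toList 'U' 'A' _ (by decide) (by decide) hpre hmin'
    obtain ⟨hiffUI, hto2UI⟩ := pv_prefix_iff f.toList 'U' 'I' _ (by decide) (by decide) hpre hmin'
    have hkeyl : (PySem.Str.slice f none (some (PySem.Chars.find f.toList ['=']))).toList
        = f.toList.take (PySem.Chars.find f.toList ['=']).toNat := by
      rw [PySem.Str.toList_slice, PySem.Chars.slice_eq_listSlice, PySem.List.slice_to _ h0]
    have hvall : (PySem.Str.slice f (some (PySem.Chars.find f.toList ['='] + 1)) none).toList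
        = f.toList.drop ((PySem.Chars.find f.toList ['=']).toNat + 1) := by
      rw [PySem.Str.toList_slice, PySem.Chars.slice_eq_listSlice,
        PySem.List.slice_from _ (by omega : (0:Int) ≤ PySem.Chars.find f.toList ['='] + 1)]
      congr 1
      omega
    have hUAkey : (PySem.Chars.startswith f.toList ['U','A','='] = true)
        ↔ "UA" = PySem.Str.slice f none (some (PySem.Chars.find f.toList ['='])) := by
      rw [hiffUA, ← String.toList_inj, hkeyl,
        show ("UA" : String).toList = ['U','A'] from rfl, eq_comm]
    have hUIkey : (PySem.Chars.startswith f.toList ['U','I','='] = true)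
        ↔ "UI" = PySem.Str.slice f none (some (PySem.Chars.find f.toList ['='])) := by
      rw [hiffUI, ← String.toList_inj, hkeyl,
        show ("UI" : String).toList = ['U','I'] from rfl, eq_comm]
    by_cases hUA : PySem.Chars.startswith f.toList ['U','A','=']
    · have hk := hUAkey.mp hUA
      have hn2 : (PySem.Chars.find f.toList ['=']).toNat = 2 := hto2UA (hiffUA.mp hUA)
      have hUI : PySem.Chars.startswith f.toList ['U','I','='] = false := by
        rw [Bool.eq_false_iff]
        intro hh
        have : ("UI" : String) = "UA" := (hUIkey.mp hh).trans hk.symm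
        simp at this
      have hval : PySem.Str.slice f (some (PySem.Chars.find f.toList ['='] + 1)) none
          = PySem.Str.slice f (some 3) none := by
        rw [← String.toList_inj, hvall, hn2]
        simp [PySem.List.slice_from _ (by omega : (0:Int) ≤ (3:Int))]
      simp [hUA, hUI, h, PySem.Dict.getD_insert, ← hk, hval,
        show ("UI" : String) ≠ "UA" by decide]
    · by_cases hUI : PySem.Chars.startswith f.toList ['U','I','=']
      · have hk := hUIkey.mp hUI
        have hn2 : (PySem.Chars.find f.toList ['=']).toNat = 2 := hto2UI (hiffUI.mp hUI)
        have hval : PySem.Str.slice f (some (PySem.Chars.find f.toList ['='] + 1)) none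
            = PySem.Str.slice f (some 3) none := by
          rw [← String.toList_inj, hvall, hn2]
          simp [PySem.List.slice_from _ (by omega : (0:Int) ≤ (3:Int))]
        simp [hUA, hUI, h, PySem.Dict.getD_insert, ← hk, hval,
          show ("UA" : String) ≠ "UI" by decide]
      · have hkUA : ¬ ("UA" = PySem.Str.slice f none (some (PySem.Chars.find f.toList ['=']))) :=
          fun hh => hUA (hUAkey.mpr hh)
        have hkUI : ¬ ("UI" = PySem.Str.slice f none (some (PySem.Chars.find f.toList ['=']))) :=
          fun hh => hUI (hUIkey.mpr hh)
        simp [hUA, hUI, h, PySem.Dict.getD_insert, hkUA, hkUI]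

theorem pv_loop_eq (fs : List String) (d : PySem.Dict String String) :
    fs.foldl pvAStep (d.getD "UA" "unknown", d.getD "UI" "unknown")
      = ((fs.foldl pvBStep d).getD "UA" "unknown", (fs.foldl pvBStep d).getD "UI" "unknown") := by
  induction fs generalizing d with
  | nil => rfl
  | cons f fs ih =>
    simp only [List.foldl_cons, pv_step_eq d f]
    exact ih (pvBStep d f)

-- ===== VERDICT (by name: the statement is the Claim_ definition above) =====
theorem afdb_v3_uniprot_id_and_name_spec : Claim_equal_afdb_v3_uniprot_id_and_name := by
  intro title _
  unfold Spec_afdb_v3_uniprot_id_and_name afdb_v3_uniprot_id_and_name afdb_v3_uniprot_id_and_name_alt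
  have h := pv_loop_eq (PySem.Str.split₀ title) PySem.Dict.empty
  simpa [pvAStep, PySem.Dict.getD_empty] using h
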